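-- pv_equiv track=rewrite | github.com/juhan-y/Algorithm_Study | 윤주한/백준7주차/2231.py | find
-- ===== SOURCE A (Python) =====
-- def find(num, target):
--     pred = num
--     while num > 0:
--         pred += num % 10
--         num //= 10
--
--     if pred == target:
--         return True
--     else:
--         return False
-- ===== SOURCE B (Python) =====
-- def find(num, target):
--     pred = num
--     if num > 0:
--         pred += sum(int(c) for c in str(num))
--     return pred == target
-- ===== Notes on version B (the rewrite author's own statement) =====
-- stated objective: idiomatic
-- what changed: B sums the digits by iterating over the decimal string str(num) (most-significant first) instead of A's while loop peeling digits with %10 and //10.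
import Mathlib
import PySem

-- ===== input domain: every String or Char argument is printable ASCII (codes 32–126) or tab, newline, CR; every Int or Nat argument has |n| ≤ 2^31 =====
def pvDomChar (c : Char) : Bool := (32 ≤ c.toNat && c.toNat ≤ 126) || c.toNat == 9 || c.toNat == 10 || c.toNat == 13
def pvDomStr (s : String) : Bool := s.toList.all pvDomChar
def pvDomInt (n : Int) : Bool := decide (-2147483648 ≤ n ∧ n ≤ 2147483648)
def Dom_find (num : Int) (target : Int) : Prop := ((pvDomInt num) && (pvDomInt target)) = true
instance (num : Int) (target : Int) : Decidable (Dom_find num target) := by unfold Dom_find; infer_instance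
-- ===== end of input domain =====

-- B sums the digits by iterating over the decimal string str(num) instead of A's %10 // 10 peeling loop; objective: idiomatic.

-- ===== PORT A =====
-- the while loop: state (num, pred); pred += num % 10; num //= 10 while num > 0
def findLoop (num pred : Int) : Int :=
  if _h : num > 0 then
    findLoop (PySem.Int.floordiv num 10) (pred + PySem.Int.mod num 10)
  else pred
termination_by num.toNat
decreasing_by
  have : PySem.Int.floordiv num 10 = Int.fdiv num 10 := rfl
  rw [this, Int.fdiv_eq_ediv]
  omega

def find (num : Int) (target : Int) : Bool :=
  let pred := findLoop num num
  if pred == target then true else false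

-- ===== PORT B =====
-- int(c) for a single decimal digit character c is exactly c.toNat - 48 on the digits str(num) produces
def find_alt (num : Int) (target : Int) : Bool :=
  let pred :=
    if num > 0 then
      num + (PySem.Int.toStr num).toList.foldl (fun s c => s + ((c.toNat : Int) - 48)) 0
    else num
  pred == target

-- ===== PRECONDITION & SPEC =====
def Spec_find (num : Int) (target : Int) (out : Bool) : Prop := out = find_alt num target
instance (num : Int) (target : Int) (out : Bool) : Decidable (Spec_find num target out) := by unfold Spec_find; infer_instance

-- ===== CLAIM (what is proved, stated in full; the proofs are below) =====
def Claim_equal_find : Prop := ∀ (num : Int) (target : Int), Dom_find num target → Spec_find num target (find num target)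

-- ===== LEMMAS AND PROOFS =====

/-- the abstract digit sum of a natural number -/
def dsum (n : Nat) : Int :=
  if n = 0 then 0 else (n % 10 : Nat) + dsum (n / 10)

def chVal (c : Char) : Int := (c.toNat : Int) - 48

theorem chVal_digitChar (d : Nat) (hd : d < 10) : chVal (Nat.digitChar d) = d := by
  interval_cases d <;> decide

theorem toDigitsCore_sum (f : Nat) : ∀ (n : Nat) (acc : List Char), n < f →
    ((Nat.toDigitsCore 10 f n acc).map chVal).sum = dsum n + ((acc.map chVal)).sum := by
  induction f with
  | zero => intro n acc h; omega
  | succ f ih =>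
    intro n acc h
    rw [Nat.toDigitsCore]
    by_cases h0 : n / 10 = 0
    · simp only [h0]
      rw [dsum]
      by_cases hn : n = 0
      · subst hn; simp [chVal_digitChar 0 (by norm_num)]
      · rw [if_neg hn]
        have hv := chVal_digitChar (n % 10) (Nat.mod_lt _ (by norm_num))
        simp [hv, dsum, h0]
    · rw [if_neg h0]
      have hn : n ≠ 0 := by intro hh; simp [hh] at h0
      have hlt : n / 10 < f := by
        have := Nat.div_lt_self (Nat.pos_of_ne_zero hn) (by norm_num : 1 < 10)
        omega
      rw [ih (n / 10) _ hlt]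
      rw [show dsum n = ((n % 10 : Nat) : Int) + dsum (n / 10) from by
        rw [dsum, if_neg hn]]
      have hv := chVal_digitChar (n % 10) (Nat.mod_lt _ (by norm_num))
      simp [hv]
      ring

theorem toDigits_sum (n : Nat) : ((Nat.toDigits 10 n).map chVal).sum = dsum n := by
  have := toDigitsCore_sum (n + 1) n [] (by omega)
  simpa [Nat.toDigits] using this

theorem foldl_chVal (l : List Char) : ∀ (a : Int),
    l.foldl (fun s c => s + ((c.toNat : Int) - 48)) a = a + (l.map chVal).sum := by
  induction l with
  | nil => intro a; simp
  | cons c t ih =>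
    intro a
    simp [List.foldl, ih, chVal]
    ring

theorem findLoop_eq (k : Nat) : ∀ (num pred : Int), num.toNat = k →
    findLoop num pred = pred + dsum num.toNat := by
  induction k using Nat.strong_induction_on with
  | _ k ih =>
    intro num pred hk
    rw [findLoop]
    by_cases h : num > 0
    · rw [dif_pos h]
      have hfd : PySem.Int.floordiv num 10 = num / 10 := by
        show Int.fdiv num 10 = num / 10
        rw [Int.fdiv_eq_ediv]
        simp
      have hmd : PySem.Int.mod num 10 = num % 10 := by
        show Int.fmod num 10 = num % 10
        rw [Int.fmod_eq_emod]
        simp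
      have hlt : (num / 10).toNat < k := by omega
      rw [hfd, hmd, ih _ hlt (num / 10) _ rfl]
      have h1 : ((num.toNat % 10 : Nat) : Int) = num % 10 := by omega
      have h2 : (num.toNat / 10 : Nat) = (num / 10).toNat := by omega
      rw [show dsum num.toNat = ((num.toNat % 10 : Nat) : Int) + dsum (num.toNat / 10) from by
        rw [dsum, if_neg (by omega : num.toNat ≠ 0)]]
      rw [h1, h2]
      ring
    · rw [dif_neg h]
      have : num.toNat = 0 := by omega
      rw [this, dsum]
      simp

theorem dsum_zero : dsum 0 = 0 := by rw [dsum]; simp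

theorem find_spec : Claim_equal_find := by
  intro num target _
  unfold Spec_find find find_alt
  rw [findLoop_eq num.toNat num num rfl]
  by_cases h : num > 0
  · rw [if_pos h]
    have htc : (PySem.Int.toStr num).toList = Nat.toDigits 10 num.toNat := by
      rw [PySem.Int.toList_toStr, PySem.Int.toChars, if_neg (by omega : ¬ num < 0)]
    rw [htc, foldl_chVal, toDigits_sum]
    by_cases he : num + dsum num.toNat = target <;> simp [he]
  · rw [if_neg h]
    rw [show num.toNat = 0 from by omega, dsum_zero]
    by_cases he : num = target <;> simp [he]
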